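-- pv_equiv track=rewrite | github.com/mhomidi/threashold-util-sim | data-scripts/bar_plots.py | create_weight_labels
-- ===== SOURCE A (Python) =====
-- def create_weight_labels(weights):
--     ws = []
--     while weights > 0:
--         ws.append(weights % 10)
--         weights /= 10
--         weights = int(weights)
--     ws = ['W=' + str(w) for w in ws[::-1]]
--     return ws
-- ===== SOURCE B (Python) =====
-- def create_weight_labels(weights):
--     if weights > 0:
--         return ['W=' + ch for ch in str(weights)]
--     return []
-- ===== Notes on version B (the rewrite author's own statement) =====
-- stated objective: idiomatic
-- what changed: B converts the integer to its decimal string once with str() and maps over its characters in natural order, instead of A's repeated float-division/modulo loop building least-significant digits first and reversing.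
import Mathlib
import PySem

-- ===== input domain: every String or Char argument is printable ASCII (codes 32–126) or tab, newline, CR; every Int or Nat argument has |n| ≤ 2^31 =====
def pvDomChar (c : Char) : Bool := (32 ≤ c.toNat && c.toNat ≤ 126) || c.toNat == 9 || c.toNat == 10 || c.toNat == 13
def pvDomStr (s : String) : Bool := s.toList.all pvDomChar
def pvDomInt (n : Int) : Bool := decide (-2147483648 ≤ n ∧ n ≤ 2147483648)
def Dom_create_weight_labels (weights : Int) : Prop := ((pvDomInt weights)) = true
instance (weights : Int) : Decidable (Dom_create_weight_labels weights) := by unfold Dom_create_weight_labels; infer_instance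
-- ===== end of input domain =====

-- B builds the labels by one str() conversion mapped over in natural order instead of A's
-- digit-extraction loop plus reversal (objective: idiomatic).

-- ===== PORT A =====
-- the while loop of A: append weights % 10, then weights = int(weights / 10)
-- (int(weights / 10) is PySem.Int.truncdiv weights 10 — exact for |weights| ≤ 2^31 < 2^53)
def cwlLoop (weights : Int) : List Int :=
  if h : weights > 0 then
    PySem.Int.mod weights 10 :: cwlLoop (PySem.Int.truncdiv weights 10)
  else []
termination_by weights.toNat
decreasing_by
  obtain ⟨m, rfl⟩ : ∃ m : Nat, weights = (m : Int) := ⟨weights.toNat, by omega⟩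
  simp only [PySem.Int.truncdiv, Int.tdiv]
  simp only [Int.ofNat_eq_natCast, Int.toNat_natCast]
  omega

-- 'W=' + str(w): char-level concatenation (exact for ASCII)
def create_weight_labels (weights : Int) : List String :=
  (cwlLoop weights).reverse.map (fun w => String.mk ('W' :: '=' :: PySem.Int.toChars w))

-- ===== PORT B =====
def create_weight_labels_alt (weights : Int) : List String :=
  if weights > 0 then
    (PySem.Int.toChars weights).map (fun c => String.mk ['W', '=', c])
  else []

-- ===== PRECONDITION & SPEC =====
def Spec_create_weight_labels (weights : Int) (out : List String) : Prop := out = create_weight_labels_alt weights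
instance (weights : Int) (out : List String) : Decidable (Spec_create_weight_labels weights out) := by unfold Spec_create_weight_labels; infer_instance

-- ===== CLAIM (what is proved, stated in full; the proofs are below) =====
def Claim_equal_create_weight_labels : Prop := ∀ (weights : Int), Dom_create_weight_labels weights → Spec_create_weight_labels weights (create_weight_labels weights)

-- ===== LEMMAS AND PROOFS =====

-- A's loop collects exactly the base-10 digits, least significant first
lemma truncdiv_ten_natCast (m : Nat) : PySem.Int.truncdiv (m : Int) 10 = ((m / 10 : Nat) : Int) := by
  simp [PySem.Int.truncdiv, Int.tdiv]

lemma mod_ten_natCast (m : Nat) : PySem.Int.mod (m : Int) 10 = ((m % 10 : Nat) : Int) := by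
  exact_mod_cast PySem.Int.mod_natCast m 10

lemma cwlLoop_natCast (m : Nat) :
    cwlLoop (m : Int) = (Nat.digits 10 m).map Int.ofNat := by
  induction m using Nat.strong_induction_on with
  | _ m ih =>
    by_cases hm : 0 < m
    · unfold cwlLoop
      rw [dif_pos (by exact_mod_cast hm)]
      rw [mod_ten_natCast, truncdiv_ten_natCast,
          ih (m / 10) (Nat.div_lt_self hm (by norm_num)),
          Nat.digits_def' (by norm_num : 1 < 10) hm]
      simp [Int.ofNat_eq_natCast]
    · have : m = 0 := by omega
      subst this
      unfold cwlLoop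
      simp

lemma cwlLoop_eq_digits (w : Int) (hw : 0 < w) :
    cwlLoop w = (Nat.digits 10 w.toNat).map Int.ofNat := by
  have h : w = ((w.toNat : Nat) : Int) := by omega
  rw [h]
  exact cwlLoop_natCast w.toNat

-- core's printing routine is the reversed digit list rendered with digitChar
lemma toDigitsCore_eq (fuel : ℕ) : ∀ n acc, 0 < n → n ≤ fuel →
    Nat.toDigitsCore 10 fuel n acc
      = ((Nat.digits 10 n).map Nat.digitChar).reverse ++ acc := by
  induction fuel with
  | zero => intro n acc hn hfuel; omega
  | succ fuel ih =>
    intro n acc hn hfuel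
    rw [Nat.toDigitsCore]
    rw [Nat.digits_def' (by norm_num : 1 < 10) hn]
    by_cases h0 : n / 10 = 0
    · simp [h0, Nat.digits_zero]
    · rw [if_neg h0]
      rw [ih (n / 10) (Nat.digitChar (n % 10) :: acc) (by omega)
          (by have := Nat.div_lt_self hn (by norm_num : 1 < 10); omega)]
      simp

lemma toChars_pos (w : Int) (hw : 0 < w) :
    PySem.Int.toChars w = ((Nat.digits 10 w.toNat).map Nat.digitChar).reverse := by
  rw [PySem.Int.toChars, if_neg (by omega), Nat.toDigits]
  rw [toDigitsCore_eq (w.toNat + 1) w.toNat [] (by omega) (by omega)]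
  simp

-- str(d) for a single digit
lemma toChars_digit (d : ℕ) (hd : d < 10) :
    PySem.Int.toChars (d : Int) = [Nat.digitChar d] := by
  rw [PySem.Int.toChars, if_neg (by omega), Int.toNat_natCast, Nat.toDigits,
      Nat.toDigitsCore]
  simp [Nat.div_eq_of_lt hd, Nat.mod_eq_of_lt hd]

-- digit lists render identically whether labelled before or after reversal
lemma labels_eq (l : List Nat) (h : ∀ d ∈ l, d < 10) :
    (l.map Int.ofNat).reverse.map
        (fun w => String.mk ('W' :: '=' :: PySem.Int.toChars w))
      = ((l.map Nat.digitChar).reverse).map (fun c => String.mk ['W', '=', c]) := by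
  induction l with
  | nil => simp
  | cons a t ih =>
    simp only [List.map_cons, List.reverse_cons, List.map_append, List.map_cons, List.map_nil]
    simp only [Int.ofNat_eq_natCast]
    rw [ih (fun d hd => h d (List.mem_cons_of_mem a hd)),
        toChars_digit a (h a (by simp))]

-- ===== VERDICT (by name: the statement is the Claim_ definition above) =====
theorem create_weight_labels_spec : Claim_equal_create_weight_labels := by
  intro w _
  unfold Spec_create_weight_labels create_weight_labels create_weight_labels_alt
  by_cases hw : w > 0
  · rw [if_pos hw, cwlLoop_eq_digits w hw, toChars_pos w hw,
        labels_eq _ (fun d hd => Nat.digits_lt_base (by norm_num) hd)]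
  · rw [if_neg hw]
    unfold cwlLoop
    simp [hw]
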